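-- pv_equiv track=rewrite | github.com/ahrtz/study | 혼자하는거/code/5.py | minX
-- ===== SOURCE A (Python) =====
-- def minX(arr):
--     # Write your code here
--     temp=0
--     val=0
--     for i in arr:
--         temp+=i
--         if temp<1:
--             if temp*(-1)>val:
--                 val=temp*(-1)
--     return val+1
-- ===== SOURCE B (Python) =====
-- def minX(arr):
--     # Backward recurrence: need = minimal starting value (>= 1) so that every
--     # prefix sum of the remaining suffix stays >= 1 (dungeon-game style).
--     need = 1
--     for x in reversed(arr):
--         need = max(1, need - x)
--     return need
-- ===== Notes on version B (the rewrite author's own statement) =====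
-- stated objective: simpler
-- what changed: Replaces A's forward running-sum-with-running-minimum scan by a backward 'minimum required start' recurrence (need = max(1, need - x) over the reversed list, dungeon-game style): no prefix sums or minimum are ever computed.
import Mathlib
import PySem

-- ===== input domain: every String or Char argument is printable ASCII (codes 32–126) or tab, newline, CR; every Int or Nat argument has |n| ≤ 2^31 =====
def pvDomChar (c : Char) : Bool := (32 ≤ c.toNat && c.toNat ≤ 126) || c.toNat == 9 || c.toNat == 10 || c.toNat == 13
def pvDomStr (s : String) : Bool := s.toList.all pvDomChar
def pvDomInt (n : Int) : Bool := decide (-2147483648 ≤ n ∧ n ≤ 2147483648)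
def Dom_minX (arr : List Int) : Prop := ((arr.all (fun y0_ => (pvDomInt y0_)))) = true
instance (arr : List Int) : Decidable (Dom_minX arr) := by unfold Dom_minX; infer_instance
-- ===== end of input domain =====

-- B replaces A's forward running-sum/running-max scan by a backward minimum-required-start recurrence (need = max 1 (need - x) over the reversed list); simpler decomposition.


-- ===== PORT A =====
def minX (arr : List Int) : Int :=
  let r := arr.foldl (fun (p : Int × Int) i =>
    let temp := p.1 + i
    let val := if temp < 1 then (if temp * (-1) > p.2 then temp * (-1) else p.2) else p.2
    (temp, val)) (0, 0)
  r.2 + 1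

-- ===== PORT B =====
def minX_alt (arr : List Int) : Int :=
  arr.reverse.foldl (fun need x => max 1 (need - x)) 1

-- ===== PRECONDITION & SPEC =====
def Spec_minX (arr : List Int) (out : Int) : Prop := out = minX_alt arr
instance (arr : List Int) (out : Int) : Decidable (Spec_minX arr out) := by unfold Spec_minX; infer_instance

-- ===== CLAIM (what is proved, stated in full; the proofs are below) =====
def Claim_equal_minX : Prop := ∀ (arr : List Int), Dom_minX arr → Spec_minX arr (minX arr)

-- ===== LEMMAS AND PROOFS =====

/-- Prefix sums of `arr` starting from running total `s`. -/
def psums (s : Int) : List Int → List Int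
  | [] => []
  | x :: t => (s + x) :: psums (s + x) t

/-- `max 0 (-x)` maximised over a list (0 for the empty list). -/
def maxNeg : List Int → Int
  | [] => 0
  | x :: t => max (max 0 (-x)) (maxNeg t)

theorem maxNeg_nonneg (l : List Int) : 0 ≤ maxNeg l := by
  induction l with
  | nil => simp [maxNeg]
  | cons x t ih => simp [maxNeg]

/-- A's fold computes `max val (maxNeg (psums temp arr))` in its second component. -/
theorem foldA_eq (arr : List Int) : ∀ s v : Int, 0 ≤ v →
    (arr.foldl (fun (p : Int × Int) i =>
      let temp := p.1 + i
      let val := if temp < 1 then (if temp * (-1) > p.2 then temp * (-1) else p.2) else p.2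
      (temp, val)) (s, v)).2 = max v (maxNeg (psums s arr)) := by
  induction arr with
  | nil => intro s v hv; simp [psums, maxNeg]; omega
  | cons x t ih =>
    intro s v hv
    simp only [List.foldl_cons, psums, maxNeg]
    have hv' : (0:Int) ≤ (if s + x < 1 then (if (s + x) * (-1) > v then (s + x) * (-1) else v) else v) := by
      split_ifs <;> omega
    rw [ih _ _ hv']
    have := maxNeg_nonneg (psums (s + x) t)
    split_ifs <;> omega

/-- Shifting the starting sum: the running negative maximum translates. -/
theorem maxNeg_shift (t : List Int) : ∀ s : Int,
    max (max 0 (-s)) (maxNeg (psums s t)) = max 0 (maxNeg (psums 0 t) - s) := by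
  induction t with
  | nil => intro s; simp [psums, maxNeg]
  | cons y t ih =>
    intro s
    have h1 := ih (s + y)
    have h2 := ih y
    simp only [psums, maxNeg, zero_add] at h1 h2 ⊢
    have n1 := maxNeg_nonneg (psums 0 t)
    have n2 := maxNeg_nonneg (psums (s + y) t)
    have n3 := maxNeg_nonneg (psums y t)
    omega

/-- B's backward recurrence equals A's forward maximum plus one. -/
theorem foldrB_eq (arr : List Int) :
    arr.foldr (fun x need => max 1 (need - x)) 1 = maxNeg (psums 0 arr) + 1 := by
  induction arr with
  | nil => simp [psums, maxNeg]
  | cons x t ih =>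
    simp only [List.foldr_cons, ih, psums, maxNeg]
    have h := maxNeg_shift t x
    simp only [zero_add] at h ⊢
    have := maxNeg_nonneg (psums 0 t)
    omega

-- ===== VERDICT (by name: the statement is the Claim_ definition above) =====
theorem minX_spec : Claim_equal_minX := by
  intro arr _
  unfold Spec_minX minX minX_alt
  dsimp only
  rw [foldA_eq arr 0 0 le_rfl, List.foldl_reverse, foldrB_eq]
  have := maxNeg_nonneg (psums 0 arr)
  omega
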